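-- pv_equiv track=rewrite | github.com/DaveXRouz/BTC | numerology_ai_framework/core/base60_codec.py | from_base60
-- ===== SOURCE A (Python) =====
-- from typing import List
--
-- def from_base60(digits: List[int]) -> int:
--     """
--     Convert list of base-60 digits to integer.
--
--     Args:
--         digits: List of base-60 digits (each 0-59)
--
--     Returns:
--         Integer value
--
--     Raises:
--         ValueError: If any digit is out of range
--
--     Examples:
--         >>> Base60Codec.from_base60([0])
--         0
--         >>> Base60Codec.from_base60([59])
--         59
--         >>> Base60Codec.from_base60([1, 0])
--         60
--         >>> Base60Codec.from_base60([33, 46])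
--         2026
--     """
--     for i, d in enumerate(digits):
--         if not 0 <= d <= 59:
--             raise ValueError(f"Digit {i} out of range: {d} (must be 0-59)")
--
--     result = 0
--     for digit in digits:
--         result = result * 60 + digit
--
--     return result
-- ===== SOURCE B (Python) =====
-- from typing import List
--
-- def from_base60(digits: List[int]) -> int:
--     for i, d in enumerate(digits):
--         if not 0 <= d <= 59:
--             raise ValueError(f"Digit {i} out of range: {d} (must be 0-59)")
--
--     return sum(d * 60 ** (len(digits) - 1 - i) for i, d in enumerate(digits))
-- ===== Notes on version B (the rewrite author's own statement) =====
-- stated objective: alternative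
-- what changed: Replaced the Horner running-accumulator loop by a positional weighted sum: each digit is multiplied by its explicit place value 60**(len-1-i) and the products are summed.
import Mathlib
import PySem

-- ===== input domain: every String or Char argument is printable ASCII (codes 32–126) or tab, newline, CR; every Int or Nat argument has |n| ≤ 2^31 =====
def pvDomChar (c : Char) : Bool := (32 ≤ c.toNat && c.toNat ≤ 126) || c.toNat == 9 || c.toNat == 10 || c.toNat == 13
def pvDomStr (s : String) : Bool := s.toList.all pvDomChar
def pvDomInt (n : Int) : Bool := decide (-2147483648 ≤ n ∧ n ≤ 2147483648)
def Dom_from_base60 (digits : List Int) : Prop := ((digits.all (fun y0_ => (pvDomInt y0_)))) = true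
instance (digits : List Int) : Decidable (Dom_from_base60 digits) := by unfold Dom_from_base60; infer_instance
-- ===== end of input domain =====

-- B replaces A's Horner accumulation by an explicit positional weighted sum (alternative decomposition, same cost).

-- ===== PORT A =====
-- A: validation loop (raises outside Pre_), then Horner: result = result*60 + digit
def from_base60 (digits : List Int) : Int :=
  digits.foldl (fun result digit => result * 60 + digit) 0

-- ===== PORT B =====
-- B: same validation (raises outside Pre_), then sum of d * 60**(len-1-i) over enumerate(digits)
def from_base60_alt (digits : List Int) : Int :=
  (PySem.List.enumerate digits).foldl
    (fun acc p => acc + p.2 * 60 ^ (digits.length - 1 - p.1.toNat)) 0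

-- ===== PRECONDITION & SPEC =====
-- Pre_: every digit in 0..59; on any other input both Pythons raise ValueError at the first bad digit.
def Pre_from_base60 (digits : List Int) : Prop :=
  ∀ d ∈ digits, 0 ≤ d ∧ d ≤ 59
instance (digits : List Int) : Decidable (Pre_from_base60 digits) := by
  unfold Pre_from_base60; infer_instance
def pvWitness_from_base60 : List Int := [33, 46]

def Spec_from_base60 (digits : List Int) (out : Int) : Prop := out = from_base60_alt digits
instance (digits : List Int) (out : Int) : Decidable (Spec_from_base60 digits out) := by unfold Spec_from_base60; infer_instance

-- ===== CLAIM (what is proved, stated in full; the proofs are below) =====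
def Claim_equal_from_base60 : Prop := ∀ (digits : List Int), Dom_from_base60 digits → Pre_from_base60 digits → Spec_from_base60 digits (from_base60 digits)

-- ===== LEMMAS AND PROOFS =====

-- canonical value: val (x::xs) = x * 60^|xs| + val xs
def pvVal : List Int → Int
  | [] => 0
  | x :: xs => x * 60 ^ xs.length + pvVal xs

theorem pvHorner (xs : List Int) : ∀ a : Int,
    xs.foldl (fun result digit => result * 60 + digit) a = a * 60 ^ xs.length + pvVal xs := by
  induction xs with
  | nil => intro a; simp [pvVal]
  | cons x xs ih =>
    intro a
    simp only [List.foldl_cons, ih, pvVal, List.length_cons]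
    ring

theorem pvSumB (L : Nat) (xs : List Int) : ∀ (s : Int) (acc : Int),
    0 ≤ s → s.toNat + xs.length = L →
    (PySem.List.enumerate xs s).foldl
      (fun acc p => acc + p.2 * 60 ^ (L - 1 - p.1.toNat)) acc = acc + pvVal xs := by
  induction xs with
  | nil => intro s acc _ _; simp [PySem.List.enumerate, pvVal]
  | cons x xs ih =>
    intro s acc hs hL
    rw [PySem.List.enumerate_cons, List.foldl_cons]
    rw [ih (s + 1) _ (by omega) (by simp at hL ⊢; omega)]
    have hexp : L - 1 - s.toNat = xs.length := by simp at hL; omega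
    simp only [pvVal, hexp]
    ring

-- ===== VERDICT (by name: the statement is the Claim_ definition above) =====
theorem from_base60_spec : Claim_equal_from_base60 := by
  intro digits _ _
  unfold Spec_from_base60 from_base60 from_base60_alt
  rw [pvHorner, pvSumB digits.length digits 0 0 (le_refl 0) (by simp)]
  simp
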